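-- pv_equiv track=rewrite | github.com/markku63/mooc-tira-s20 | bitsort.py | solve
-- ===== SOURCE A (Python) =====
-- def solve(s):
--     zeros = 0
--     count = 0
--     for i in range(len(s) - 1, -1, -1):
--         if s[i] == '0':
--             zeros += 1
--         else:
--             count += zeros
--     return count
-- ===== SOURCE B (Python) =====
-- def solve(s):
--     # two-pass: build a prefix table of '1's-before-each-position, then sum it at the '0's
--     pref = []
--     ones = 0
--     for c in s:
--         pref.append(ones)
--         if c != '0':
--             ones += 1
--     total = 0
--     for p, c in zip(pref, s):
--         if c == '0':
--             total += p
--     return total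
-- ===== Notes on version B (the rewrite author's own statement) =====
-- stated objective: alternative
-- what changed: Replaces A's single reverse scan (counting zeros to the right and accumulating at each non-'0') with a forward two-pass shape: build an explicit prefix table of ones-seen-before, then aggregate it at the '0' positions.
import Mathlib
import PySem

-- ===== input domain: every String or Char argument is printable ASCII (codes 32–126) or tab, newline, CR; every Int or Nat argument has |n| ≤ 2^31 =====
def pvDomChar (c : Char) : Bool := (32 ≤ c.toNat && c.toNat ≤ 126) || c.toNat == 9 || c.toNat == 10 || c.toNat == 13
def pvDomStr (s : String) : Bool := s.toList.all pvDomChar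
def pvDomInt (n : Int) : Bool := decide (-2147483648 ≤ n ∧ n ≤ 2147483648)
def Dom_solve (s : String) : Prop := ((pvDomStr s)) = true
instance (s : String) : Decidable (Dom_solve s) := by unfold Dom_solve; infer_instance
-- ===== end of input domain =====

-- B replaces A's single reverse scan with a forward two-pass prefix-table-then-aggregate shape (alternative decomposition, same cost).

-- ===== PORT A =====
-- A: iterate i from len(s)-1 down to 0; s[i] is always in range, rendered with pyGetD.
def solve (s : String) : Int :=
  let l := s.toList
  let st := (PySem.List.pyRange (PySem.Str.len s - 1) (-1) (-1)).foldl
    (fun (st : Int × Int) i =>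
      if PySem.List.pyGetD l i ' ' = '0' then (st.1 + 1, st.2) else (st.1, st.2 + st.1))
    (0, 0)
  st.2

-- ===== PORT B =====
-- first pass of Source B: for each position, the number of non-'0' characters strictly before it
def buildPref : List Char → Int → List Int
  | [], _ => []
  | c :: t, ones => ones :: buildPref t (if c = '0' then ones else ones + 1)

def solve_alt (s : String) : Int :=
  let l := s.toList
  ((buildPref l 0).zip l).foldl (fun acc pc => if pc.2 = '0' then acc + pc.1 else acc) 0

-- ===== PRECONDITION & SPEC =====
def Spec_solve (s : String) (out : Int) : Prop := out = solve_alt s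
instance (s : String) (out : Int) : Decidable (Spec_solve s out) := by unfold Spec_solve; infer_instance

-- ===== CLAIM (what is proved, stated in full; the proofs are below) =====
def Claim_equal_solve : Prop := ∀ (s : String), Dom_solve s → Spec_solve s (solve s)

-- ===== LEMMAS AND PROOFS =====

-- A's loop body as a foldr step over the characters themselves
def stepA (c : Char) (st : Int × Int) : Int × Int :=
  if c = '0' then (st.1 + 1, st.2) else (st.1, st.2 + st.1)

lemma stepA_fst (l : List Char) :
    (l.foldr stepA (0, 0)).1 = (l.countP (· = '0') : Int) := by
  induction l with
  | nil => simp
  | cons c t ih =>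
    simp only [List.foldr_cons, stepA, List.countP_cons]
    by_cases h : c = '0' <;> simp [h, ih]

lemma main_lemma (l : List Char) (ones acc : Int) :
    ((buildPref l ones).zip l).foldl (fun acc pc => if pc.2 = '0' then acc + pc.1 else acc) acc
      = acc + ones * (l.countP (· = '0') : Int) + (l.foldr stepA (0, 0)).2 := by
  induction l generalizing ones acc with
  | nil => simp [buildPref]
  | cons c t ih =>
    simp only [buildPref, List.zip_cons_cons, List.foldl_cons, List.countP_cons, List.foldr_cons]
    by_cases h : c = '0'
    · simp only [h, stepA, decide_true, if_true]
      rw [ih]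
      push_cast
      ring
    · simp only [stepA, h, decide_false, if_false]
      rw [ih, stepA_fst]
      push_cast
      ring

lemma solve_eq_foldr (s : String) :
    solve s = (s.toList.foldr stepA (0, 0)).2 := by
  unfold solve
  have h1 : PySem.List.pyRange (PySem.Str.len s - 1) (-1) (-1)
      = (PySem.List.pyRange 0 (PySem.Str.len s) 1).reverse := by
    rw [PySem.List.pyRange_neg_one_eq_reverse]
    norm_num
  have h2 : (PySem.List.pyRange 0 (PySem.Str.len s) 1).map
      (fun j => PySem.List.pyGetD s.toList j ' ') = s.toList := by
    have := PySem.List.map_pyGetD_pyRange_zero (xs := s.toList) (d := ' ')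
    simpa using this
  have h3 : (PySem.List.pyRange 0 (PySem.Str.len s) 1).reverse.map
      (fun j => PySem.List.pyGetD s.toList j ' ') = s.toList.reverse := by
    rw [List.map_reverse, h2]
  show ((PySem.List.pyRange (PySem.Str.len s - 1) (-1) (-1)).foldl
      (fun (st : Int × Int) i =>
        if PySem.List.pyGetD s.toList i ' ' = '0' then (st.1 + 1, st.2) else (st.1, st.2 + st.1))
      (0, 0)).2 = (s.toList.foldr stepA (0, 0)).2
  have h4 : ∀ (init : Int × Int) (L : List Int),
      L.foldl (fun (st : Int × Int) i =>
          if PySem.List.pyGetD s.toList i ' ' = '0' then (st.1 + 1, st.2) else (st.1, st.2 + st.1)) init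
        = (L.map (fun j => PySem.List.pyGetD s.toList j ' ')).foldl
            (fun (st : Int × Int) c =>
              if c = '0' then (st.1 + 1, st.2) else (st.1, st.2 + st.1)) init := by
    intro init L
    rw [List.foldl_map]
  rw [h1, h4, h3, List.foldl_reverse]
  rfl

-- ===== VERDICT (by name: the statement is the Claim_ definition above) =====
theorem solve_spec : Claim_equal_solve := by
  intro s _
  unfold Spec_solve solve_alt
  rw [solve_eq_foldr s]
  rw [main_lemma s.toList 0 0]
  ring
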